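-- pv_equiv track=rewrite | github.com/jdougnac/iHateGithub | NPCGenerator/info/hammerSortSkill.py | sortSkill
-- ===== SOURCE A (Python) =====
-- def sortSkill(lista,x):
--     lista2=[]
--     lista = [z.strip(' ') for z in lista]
--     lista = [z.strip("\n") for z in lista]
--     h=[]
--     if x==0:
--         for item in lista:
--             if item not in h:
--                 h.append(item)
--         lista=h
--     if x==1:
--         for item in lista:
--             g=lista.count(item)
--             if g ==1:
--                 lista2.append(item)
--             elif g==2:
--                 item2= ''.join(('',item,' +10'))
--                 lista2.append(item2)
--             elif g>=3:
--                 item2= ''.join(('',item,' +20'))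
--                 lista2.append(item2)
--         lista = list( dict.fromkeys(lista2))
--
--     lista.sort()
--     return(lista)
-- ===== SOURCE B (Python) =====
-- def sortSkill(lista, x):
--     stripped = sorted(z.strip(' ').strip('\n') for z in lista)
--     if x == 0:
--         out = []
--         for z in stripped:
--             if not out or out[-1] != z:
--                 out.append(z)
--         return out
--     if x == 1:
--         annots = []
--         i, n = 0, len(stripped)
--         while i < n:
--             j = i
--             while j < n and stripped[j] == stripped[i]:
--                 j += 1
--             c = j - i
--             annots.append(stripped[i] + ('' if c == 1 else ' +10' if c == 2 else ' +20'))
--             i = j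
--         return sorted(set(annots))
--     return stripped
-- ===== Notes on version B (the rewrite author's own statement) =====
-- stated objective: alternative
-- what changed: B sorts the stripped list once and does a single run-length pass over adjacent equal elements (neighbour-dedup for x==0, per-run count annotation for x==1), replacing A's per-element membership scans and list.count calls.
import Mathlib
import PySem

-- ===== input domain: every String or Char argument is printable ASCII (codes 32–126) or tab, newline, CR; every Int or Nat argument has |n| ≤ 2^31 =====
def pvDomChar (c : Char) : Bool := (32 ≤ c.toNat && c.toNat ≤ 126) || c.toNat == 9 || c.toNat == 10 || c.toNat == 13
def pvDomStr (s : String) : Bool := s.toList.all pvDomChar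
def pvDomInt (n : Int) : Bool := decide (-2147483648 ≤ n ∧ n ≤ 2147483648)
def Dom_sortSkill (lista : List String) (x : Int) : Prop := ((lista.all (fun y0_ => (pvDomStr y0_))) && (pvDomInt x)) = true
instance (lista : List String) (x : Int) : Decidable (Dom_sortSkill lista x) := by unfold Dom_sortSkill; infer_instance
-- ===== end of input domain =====

-- B replaces A's per-element membership/count scans by one sort followed by a single
-- run-length pass over the sorted list (objective: alternative algorithm, same result).

-- ===== PORT A =====
-- literal transliteration of A; ''.join(('', item, ' +10')) is '' + item + ' +10' = item ++ " +10"
def sortSkill (lista : List String) (x : Int) : List String :=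
  let l1 := (lista.map (fun z => PySem.Str.stripChars z " ")).map
              (fun z => PySem.Str.stripChars z "\n")
  let h := l1.foldl (fun h item => if h.contains item then h else h ++ [item]) []
  let la := if x = 0 then h else l1
  let la :=
    if x = 1 then
      let lista2 := la.foldl (fun l2 item =>
        let g : Int := (la.count item : Int)
        if g = 1 then l2 ++ [item]
        else if g = 2 then l2 ++ [item ++ " +10"]
        else if g ≥ 3 then l2 ++ [item ++ " +20"]
        else l2) []
      PySem.List.dedup lista2
    else la
  PySem.List.sorted la (fun s => s) false

-- ===== PORT B =====
-- the inner while loop: one run of equal elements at the head (j scans equal elements; c = j - i)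
def pvRunAnnot : List String → List String
  | [] => []
  | z :: rest =>
    let c := 1 + (rest.takeWhile (fun w => w == z)).length
    (z ++ (if c = 1 then "" else if c = 2 then " +10" else " +20")) ::
      pvRunAnnot (rest.dropWhile (fun w => w == z))
termination_by l => l.length
decreasing_by
  exact Nat.lt_succ_of_le (List.length_dropWhile_le _ _)

def sortSkill_alt (lista : List String) (x : Int) : List String :=
  let stripped := PySem.List.sorted
    ((lista.map (fun z => PySem.Str.stripChars z " ")).map
      (fun z => PySem.Str.stripChars z "\n")) (fun s => s) false
  if x = 0 then
    stripped.foldl (fun out z => if out.getLast? == some z then out else out ++ [z]) []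
  else if x = 1 then
    PySem.List.sorted (PySem.Set.ofList (pvRunAnnot stripped)) (fun s => s) false
  else stripped

-- ===== PRECONDITION & SPEC =====
def Spec_sortSkill (lista : List String) (x : Int) (out : List String) : Prop := out = sortSkill_alt lista x
instance (lista : List String) (x : Int) (out : List String) : Decidable (Spec_sortSkill lista x out) := by unfold Spec_sortSkill; infer_instance

-- ===== CLAIM (what is proved, stated in full; the proofs are below) =====
def Claim_equal_sortSkill : Prop := ∀ (lista : List String) (x : Int), Dom_sortSkill lista x → Spec_sortSkill lista x (sortSkill lista x)

-- ===== LEMMAS AND PROOFS =====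

-- the annotation A attaches to each occurrence (count taken in the whole list L)
def pvSfx (n : Nat) : String := if n = 1 then "" else if n = 2 then " +10" else " +20"

lemma pv_le_getLast (l : List String) (hl : l.Pairwise (· < ·)) :
    ∀ a ∈ l, ∀ m, l.getLast? = some m → a ≤ m := by
  induction l with
  | nil => simp
  | cons z t ih =>
    intro a ha m hm
    rcases List.pairwise_cons.1 hl with ⟨hz, ht⟩
    cases t with
    | nil =>
      simp at hm ha; subst hm; simp [ha]
    | cons w t' =>
      rw [List.getLast?_cons_cons] at hm
      rcases List.mem_cons.1 ha with rfl | ha'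
      · exact le_of_lt (lt_of_lt_of_le (hz w (by simp)) (ih ht w (by simp) m hm))
      · exact ih ht a ha' m hm

lemma pv_cd_fold (s : List String) :
    ∀ acc : List String, acc.Pairwise (· < ·) → s.Pairwise (· ≤ ·) →
    (∀ a ∈ acc, ∀ b ∈ s, a ≤ b) →
    (s.foldl (fun out z => if out.getLast? == some z then out else out ++ [z]) acc).Pairwise (· < ·) ∧
    (∀ y, y ∈ s.foldl (fun out z => if out.getLast? == some z then out else out ++ [z]) acc ↔ y ∈ acc ∨ y ∈ s) := by
  induction s with
  | nil => intro acc h1 _ _; simpa using h1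
  | cons z s' ih =>
    intro acc h1 h2 h3
    rcases List.pairwise_cons.1 h2 with ⟨hz, hs'⟩
    simp only [List.foldl_cons]
    by_cases hlast : acc.getLast? = some z
    · have hz_mem : z ∈ acc := List.mem_of_getLast? hlast
      simp only [hlast, beq_self_eq_true, if_pos]
      have := ih acc h1 hs' (fun a ha b hb => h3 a ha b (List.mem_cons_of_mem _ hb))
      refine ⟨this.1, fun y => ?_⟩
      rw [this.2 y]
      constructor
      · rintro (h | h)
        · exact Or.inl h
        · exact Or.inr (List.mem_cons_of_mem _ h)
      · rintro (h | h)
        · exact Or.inl h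
        · rcases List.mem_cons.1 h with rfl | h
          · exact Or.inl hz_mem
          · exact Or.inr h
    · have hbe : (acc.getLast? == some z) = false := by
        simpa using hlast
      simp only [hbe, if_neg, Bool.false_eq_true, not_false_iff]
      have hlt : ∀ a ∈ acc, a < z := by
        intro a ha
        cases hacc : acc.getLast? with
        | none => simp [List.getLast?_eq_none_iff.1 hacc] at ha
        | some m =>
          have ham : a ≤ m := pv_le_getLast acc h1 a ha m hacc
          have hmz : m ≤ z := h3 m (List.mem_of_getLast? hacc) z (by simp)
          have : m ≠ z := fun h => hlast (h ▸ hacc)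
          exact lt_of_le_of_lt ham (lt_of_le_of_ne hmz this)
      have h1' : (acc ++ [z]).Pairwise (· < ·) := by
        rw [List.pairwise_append]
        exact ⟨h1, by simp, by simpa using hlt⟩
      have h3' : ∀ a ∈ acc ++ [z], ∀ b ∈ s', a ≤ b := by
        intro a ha b hb
        rcases List.mem_append.1 ha with ha | ha
        · exact h3 a ha b (List.mem_cons_of_mem _ hb)
        · simp at ha; subst ha; exact hz b hb
      have := ih (acc ++ [z]) h1' hs' h3'
      refine ⟨this.1, fun y => ?_⟩
      rw [this.2 y]
      constructor
      · rintro (h | h)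
        · rcases List.mem_append.1 h with h | h
          · exact Or.inl h
          · simp at h; subst h; exact Or.inr (by simp)
        · exact Or.inr (List.mem_cons_of_mem _ h)
      · rintro (h | h)
        · exact Or.inl (List.mem_append.2 (Or.inl h))
        · rcases List.mem_cons.1 h with rfl | h
          · exact Or.inl (by simp)
          · exact Or.inr h

lemma pv_mem_runAnnot (S : List String) (hS : S.Pairwise (· ≤ ·)) (y : String) :
    y ∈ pvRunAnnot S ↔ ∃ w ∈ S, y = w ++ pvSfx (S.count w) := by
  induction S using pvRunAnnot.induct with
  | case1 => simp [pvRunAnnot]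
  | case2 z rest ih =>
    rcases List.pairwise_cons.1 hS with ⟨hz, hrest⟩
    have hsplit : rest = rest.takeWhile (fun w => w == z) ++ rest.dropWhile (fun w => w == z) :=
      (List.takeWhile_append_dropWhile).symm
    have hrun : ∀ w ∈ rest.takeWhile (fun w => w == z), w = z := by
      intro w hw
      simpa using List.mem_takeWhile_imp hw
    have hd : ∀ w ∈ rest.dropWhile (fun w => w == z), z < w := by
      intro w hw
      cases hdw : rest.dropWhile (fun w => w == z) with
      | nil => simp [hdw] at hw
      | cons w0 t =>
        have hhd := List.head?_dropWhile_not (fun w => w == z) rest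
        rw [hdw] at hhd
        have hw0ne : w0 ≠ z := by
          intro h
          rw [show ((w0 :: t).head? ) = some w0 from rfl] at hhd
          simp [h] at hhd
        have hw0mem : w0 ∈ rest := (List.dropWhile_sublist _).subset (by rw [hdw]; exact List.mem_cons_self ..)
        have hz0 : z < w0 := lt_of_le_of_ne (hz w0 hw0mem) (Ne.symm hw0ne)
        rw [hdw] at hw
        rcases List.mem_cons.1 hw with rfl | hw'
        · exact hz0
        · have hp : (rest.dropWhile (fun w => w == z)).Pairwise (· ≤ ·) :=
            List.Pairwise.sublist (List.dropWhile_sublist _) hrest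
          rw [hdw] at hp
          exact lt_of_lt_of_le hz0 ((List.pairwise_cons.1 hp).1 w hw')
    have hcz : (z :: rest).count z = 1 + (rest.takeWhile (fun w => w == z)).length := by
      have h1 : (rest.takeWhile (fun w => w == z)).count z
          = (rest.takeWhile (fun w => w == z)).length :=
        List.count_eq_length.2 (fun b hb => (hrun b hb).symm)
      have h2 : (rest.dropWhile (fun w => w == z)).count z = 0 :=
        List.count_eq_zero.2 (fun hmem => absurd (hd z hmem) (lt_irrefl z))
      rw [List.count_cons_self]
      conv_lhs => rw [hsplit]
      rw [List.count_append, h1, h2]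
      omega
    have hcw : ∀ w ∈ rest.dropWhile (fun w => w == z),
        (z :: rest).count w = (rest.dropWhile (fun w => w == z)).count w := by
      intro w hw
      have hwz : w ≠ z := fun h => absurd (h ▸ hd w hw) (lt_irrefl _)
      have h1 : (rest.takeWhile (fun w => w == z)).count w = 0 :=
        List.count_eq_zero.2 (fun hmem => hwz (hrun w hmem))
      have hz_ne : (z == w) = false := by simpa using Ne.symm hwz
      rw [List.count_cons, hz_ne]
      simp only [Bool.false_eq_true, if_false]
      conv_lhs => rw [hsplit]
      rw [List.count_append, h1]
      omega
    have hp' : (rest.dropWhile (fun w => w == z)).Pairwise (· ≤ ·) :=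
      List.Pairwise.sublist (List.dropWhile_sublist _) hrest
    rw [pvRunAnnot]
    simp only [List.mem_cons, ih hp']
    constructor
    · rintro (rfl | ⟨w, hw, rfl⟩)
      · exact ⟨z, Or.inl rfl, by rw [hcz]; rfl⟩
      · exact ⟨w, Or.inr ((List.dropWhile_sublist _).subset hw), by rw [hcw w hw]⟩
    · rintro ⟨w, hw, rfl⟩
      rcases hw with rfl | hw
      · exact Or.inl (by rw [hcz]; rfl)
      · rw [hsplit] at hw
        rcases List.mem_append.1 hw with hw | hw
        · have hwe : w = z := hrun w hw
          subst hwe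
          exact Or.inl (by rw [hcz]; rfl)
        · exact Or.inr ⟨w, hw, by rw [hcw w hw]⟩

lemma pv_main (lista : List String) (x : Int) :
    sortSkill lista x = sortSkill_alt lista x := by
  unfold sortSkill sortSkill_alt
  set L := (lista.map (fun z => PySem.Str.stripChars z " ")).map
      (fun z => PySem.Str.stripChars z "\n") with hL
  set S := PySem.List.sorted L (fun s => s) false with hS
  have hSpw : S.Pairwise (· ≤ ·) := by
    simpa using PySem.List.sorted_pairwise L (fun s => s)
  have hSperm : S.Perm L := PySem.List.sorted_perm L (fun s => s) false
  by_cases h0 : x = 0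
  · -- x == 0 : A dedups in first-occurrence order, B drops equal neighbours of the sorted list
    subst h0
    simp only [show ((0:Int) = 1) = False from by norm_num,
      if_true, if_false]
    have hA : L.foldl (fun h item => if h.contains item then h else h ++ [item]) []
        = PySem.Set.ofList L := rfl
    rw [hA]
    have hcd := pv_cd_fold S [] (by simp) hSpw (by simp)
    refine PySem.List.sorted_eq_of_perm_of_pairwise_lt _ _ _ ?_ ?_
    · rw [List.perm_ext_iff_of_nodup (hcd.1.imp ne_of_lt) (PySem.Set.nodup_ofList L)]
      intro y
      rw [hcd.2 y, PySem.Set.mem_ofList]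
      simp [hSperm.mem_iff]
    · simpa using hcd.1
  · by_cases h1 : x = 1
    · -- x == 1 : A annotates every occurrence by its count and dedups, B annotates each run once
      subst h1
      simp only [show ((1:Int) = 0) = False from by norm_num,
        if_true, if_false]
      have hmap : L.foldl (fun l2 item =>
          let g : Int := (L.count item : Int)
          if g = 1 then l2 ++ [item]
          else if g = 2 then l2 ++ [item ++ " +10"]
          else if g ≥ 3 then l2 ++ [item ++ " +20"]
          else l2) []
          = L.map (fun item => item ++ pvSfx (L.count item)) := by
        rw [PySem.List.foldl_congr_mem L _
          (fun l2 item => l2 ++ [item ++ pvSfx (L.count item)]) []]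
        · exact PySem.List.foldl_append_singleton_eq_map _ L []
        · intro acc item hmem
          have hpos : 0 < L.count item := List.count_pos_iff.2 hmem
          dsimp only
          cases hc : L.count item with
          | zero => omega
          | succ n =>
            cases n with
            | zero =>
              rw [if_pos (by norm_num)]
              simp [pvSfx]
            | succ m =>
              cases m with
              | zero =>
                rw [if_neg (by norm_num), if_pos (by norm_num)]
                simp [pvSfx]
              | succ k =>
                rw [if_neg (by push_cast; omega), if_neg (by push_cast; omega),
                  if_pos (by push_cast; omega)]
                have hsfx : pvSfx (k + 1 + 1 + 1) = " +20" := by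
                  unfold pvSfx
                  rw [if_neg (by omega), if_neg (by omega)]
                rw [hsfx]
      rw [hmap, PySem.List.dedup_eq_ofList]
      refine PySem.List.sorted_eq_sorted_of_perm _ _ _ (fun a b h => h) ?_
      rw [List.perm_ext_iff_of_nodup (PySem.Set.nodup_ofList _) (PySem.Set.nodup_ofList _)]
      intro y
      rw [PySem.Set.mem_ofList, PySem.Set.mem_ofList, pv_mem_runAnnot S hSpw y, List.mem_map]
      constructor
      · rintro ⟨w, hw, rfl⟩
        exact ⟨w, hSperm.mem_iff.2 hw, by rw [hSperm.count_eq w]⟩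
      · rintro ⟨w, hw, rfl⟩
        exact ⟨w, hSperm.mem_iff.1 hw, by rw [hSperm.count_eq w]⟩
    · -- any other x : both return the sorted stripped list (duplicates kept)
      simp only [if_neg h0, if_neg h1]
      rw [hS]

-- ===== VERDICT (by name: the statement is the Claim_ definition above) =====
theorem sortSkill_spec : Claim_equal_sortSkill := by
  intro lista x _
  unfold Spec_sortSkill
  exact pv_main lista x
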